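-- pv_equiv track=rewrite | github.com/AbineshSenthil/Aegis-Sphere | pipeline/oncocase_builder.py | _suggest_regimen
-- ===== SOURCE A (Python) =====
-- def _suggest_regimen(clinical_frame: dict, findings: dict) -> str:
--     """Suggest a regimen based on clinical frame (heuristic for prompt injection)."""
--     conditions = [c.lower() for c in clinical_frame.get("conditions", [])]
--     if any("lymphoma" in c for c in conditions):
--         return "CHOP"
--     elif any("kaposi" in c for c in conditions):
--         return "Liposomal Doxorubicin + ART optimization"
--     elif any("cervical" in c for c in conditions):
--         return "Cisplatin + RT"
--     elif any("lung" in c or "adenocarcinoma" in c for c in conditions):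
--         return "Carboplatin + Paclitaxel"
--     return "CHOP"  # default for HIV-associated lymphoma
-- ===== SOURCE B (Python) =====
-- _REGIMENS = [
--     "CHOP",
--     "Liposomal Doxorubicin + ART optimization",
--     "Cisplatin + RT",
--     "Carboplatin + Paclitaxel",
--     "CHOP",  # rank 4 = no rule matched: default
-- ]
--
-- def _rank(c):
--     """Lowest-priority-index rule matched by one lowered condition (4 = none)."""
--     if "lymphoma" in c:
--         return 0
--     if "kaposi" in c:
--         return 1
--     if "cervical" in c:
--         return 2
--     if "lung" in c or "adenocarcinoma" in c:
--         return 3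
--     return 4
--
-- def _suggest_regimen(clinical_frame: dict, findings: dict) -> str:
--     """Single pass over conditions: reduce by min over per-condition rule ranks."""
--     best = min((_rank(c.lower()) for c in clinical_frame.get("conditions", [])), default=4)
--     return _REGIMENS[best]
-- ===== Notes on version B (the rewrite author's own statement) =====
-- stated objective: alternative
-- what changed: Instead of A's four staged any-scans over the conditions (one per rule, rule-outer), B makes a single conditions-outer pass computing each condition's minimal matching rule rank and reduces by min; the overall minimum rank indexes the regimen table.
import Mathlib
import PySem

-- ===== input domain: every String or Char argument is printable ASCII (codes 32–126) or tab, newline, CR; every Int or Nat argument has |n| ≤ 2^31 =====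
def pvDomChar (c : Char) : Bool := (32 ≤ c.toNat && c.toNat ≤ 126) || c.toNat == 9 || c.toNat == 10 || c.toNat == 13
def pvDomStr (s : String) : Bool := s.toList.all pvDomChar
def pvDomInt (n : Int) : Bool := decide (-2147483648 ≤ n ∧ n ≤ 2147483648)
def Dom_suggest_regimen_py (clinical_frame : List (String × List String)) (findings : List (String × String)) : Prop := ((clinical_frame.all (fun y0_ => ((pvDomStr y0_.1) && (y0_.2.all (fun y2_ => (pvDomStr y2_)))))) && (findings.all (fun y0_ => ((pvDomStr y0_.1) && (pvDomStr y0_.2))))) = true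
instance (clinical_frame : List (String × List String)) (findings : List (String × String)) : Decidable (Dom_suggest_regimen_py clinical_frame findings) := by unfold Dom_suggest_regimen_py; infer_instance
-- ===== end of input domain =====

-- B replaces A's rule-outer staged scans by one conditions-outer pass reducing per-condition rule ranks by min (alternative decomposition, same cost).

-- ===== PORT A =====
def suggest_regimen_py (clinical_frame : List (String × List String)) (findings : List (String × String)) : String :=
  let conditions := ((PySem.Dict.mk clinical_frame).getD "conditions" []).map PySem.Str.lower
  if conditions.any (fun c => PySem.Str.isIn "lymphoma" c) then "CHOP"
  else if conditions.any (fun c => PySem.Str.isIn "kaposi" c) then "Liposomal Doxorubicin + ART optimization"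
  else if conditions.any (fun c => PySem.Str.isIn "cervical" c) then "Cisplatin + RT"
  else if conditions.any (fun c => PySem.Str.isIn "lung" c || PySem.Str.isIn "adenocarcinoma" c) then "Carboplatin + Paclitaxel"
  else "CHOP"

-- ===== PORT B =====
def pvRegimens : List String :=
  [ "CHOP",
    "Liposomal Doxorubicin + ART optimization",
    "Cisplatin + RT",
    "Carboplatin + Paclitaxel",
    "CHOP" ]

-- lowest-priority-index rule matched by one lowered condition (4 = none)
def pvRank (c : String) : Nat :=
  if PySem.Str.isIn "lymphoma" c then 0
  else if PySem.Str.isIn "kaposi" c then 1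
  else if PySem.Str.isIn "cervical" c then 2
  else if PySem.Str.isIn "lung" c || PySem.Str.isIn "adenocarcinoma" c then 3
  else 4

def suggest_regimen_py_alt (clinical_frame : List (String × List String)) (findings : List (String × String)) : String :=
  let conditions := ((PySem.Dict.mk clinical_frame).getD "conditions" []).map PySem.Str.lower
  let best := (conditions.map pvRank).foldl min 4
  pvRegimens.getD best "CHOP"

-- ===== PRECONDITION & SPEC =====
def Spec_suggest_regimen_py (clinical_frame : List (String × List String)) (findings : List (String × String)) (out : String) : Prop := out = suggest_regimen_py_alt clinical_frame findings
instance (clinical_frame : List (String × List String)) (findings : List (String × String)) (out : String) : Decidable (Spec_suggest_regimen_py clinical_frame findings out) := by unfold Spec_suggest_regimen_py; infer_instance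

-- ===== CLAIM (what is proved, stated in full; the proofs are below) =====
def Claim_equal_suggest_regimen_py : Prop := ∀ (clinical_frame : List (String × List String)) (findings : List (String × String)), Dom_suggest_regimen_py clinical_frame findings → Spec_suggest_regimen_py clinical_frame findings (suggest_regimen_py clinical_frame findings)

-- ===== LEMMAS AND PROOFS =====

-- A's elif chain over a condition list, expressed as a rank in 0..4
def pvChain (l : List String) : Nat :=
  if l.any (fun c => PySem.Str.isIn "lymphoma" c) then 0
  else if l.any (fun c => PySem.Str.isIn "kaposi" c) then 1
  else if l.any (fun c => PySem.Str.isIn "cervical" c) then 2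
  else if l.any (fun c => PySem.Str.isIn "lung" c || PySem.Str.isIn "adenocarcinoma" c) then 3
  else 4

theorem pvChain_le (l : List String) : pvChain l ≤ 4 := by
  unfold pvChain; split_ifs <;> omega

theorem pv_chain_min (b1 b2 b3 b4 a1 a2 a3 a4 : Bool) :
    (if (b1 || a1) = true then 0 else if (b2 || a2) = true then 1
     else if (b3 || a3) = true then 2 else if (b4 || a4) = true then 3 else 4)
    = min
      (if b1 = true then 0 else if b2 = true then 1
       else if b3 = true then 2 else if b4 = true then 3 else (4 : Nat))
      (if a1 = true then 0 else if a2 = true then 1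
       else if a3 = true then 2 else if a4 = true then 3 else 4) := by
  revert b1 b2 b3 b4 a1 a2 a3 a4; decide

theorem pvChain_cons (c : String) (l : List String) :
    pvChain (c :: l) = min (pvRank c) (pvChain l) := by
  unfold pvChain pvRank
  simp only [List.any_cons]
  exact pv_chain_min _ _ _ _ _ _ _ _

theorem pv_foldl_min_chain (l : List String) (a : Nat) (ha : a ≤ 4) :
    (l.map pvRank).foldl min a = min a (pvChain l) := by
  induction l generalizing a with
  | nil => simp [pvChain]; omega
  | cons c t ih =>
      have hrk : pvRank c ≤ 4 := by unfold pvRank; split_ifs <;> omega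
      simp only [List.map_cons, List.foldl_cons]
      rw [ih (min a (pvRank c)) (by omega), pvChain_cons]
      omega

theorem pv_getD_chain (l : List String) :
    pvRegimens.getD (pvChain l) "CHOP" =
      (if l.any (fun c => PySem.Str.isIn "lymphoma" c) then "CHOP"
       else if l.any (fun c => PySem.Str.isIn "kaposi" c) then "Liposomal Doxorubicin + ART optimization"
       else if l.any (fun c => PySem.Str.isIn "cervical" c) then "Cisplatin + RT"
       else if l.any (fun c => PySem.Str.isIn "lung" c || PySem.Str.isIn "adenocarcinoma" c) then "Carboplatin + Paclitaxel"
       else "CHOP") := by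
  unfold pvChain
  split_ifs <;> rfl

-- ===== VERDICT (by name: the statement is the Claim_ definition above) =====
theorem suggest_regimen_py_spec : Claim_equal_suggest_regimen_py := by
  intro cf f _
  unfold Spec_suggest_regimen_py suggest_regimen_py suggest_regimen_py_alt
  have h := pv_foldl_min_chain (((PySem.Dict.mk cf).getD "conditions" []).map PySem.Str.lower) 4 (le_refl 4)
  simp only [h, min_eq_right (pvChain_le _), pv_getD_chain]
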